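-- pv_equiv track=rewrite | github.com/EvieMahsem/Revature_Staging_Coding_Challs | Walk_on_the_axis.py | distanceCalc
-- ===== SOURCE A (Python) =====
-- def distanceCalc(T):
--     #Sets up the initial distance
--     distCalc = 0
--     #Creates a list with the values of N for a given T
--     listVal = [N + 1 for N in range(T)]
--
--     #This allows easy iteration through the list
--     listVal.reverse()
--
--     for i in range(T):
--         if i == 0:
--             #Double counting for going back to (0,0)
--             distCalc += 2*listVal[i]
--         else:
--             distCalc += listVal[i]
--
--     return distCalc
-- ===== SOURCE B (Python) =====
-- def distanceCalc(T):
--     # Gauss closed form of the walk total: the first leg counts double,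
--     # the remaining legs sum an arithmetic series; zero for non-positive T.
--     if T <= 0:
--         return 0
--     return 2 * T + T * (T - 1) // 2
-- ===== Notes on version B (the rewrite author's own statement) =====
-- stated objective: faster
-- what changed: Replaces building, reversing and looping over a T-element list with a constant-time Gauss closed-form arithmetic expression.
import Mathlib
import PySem

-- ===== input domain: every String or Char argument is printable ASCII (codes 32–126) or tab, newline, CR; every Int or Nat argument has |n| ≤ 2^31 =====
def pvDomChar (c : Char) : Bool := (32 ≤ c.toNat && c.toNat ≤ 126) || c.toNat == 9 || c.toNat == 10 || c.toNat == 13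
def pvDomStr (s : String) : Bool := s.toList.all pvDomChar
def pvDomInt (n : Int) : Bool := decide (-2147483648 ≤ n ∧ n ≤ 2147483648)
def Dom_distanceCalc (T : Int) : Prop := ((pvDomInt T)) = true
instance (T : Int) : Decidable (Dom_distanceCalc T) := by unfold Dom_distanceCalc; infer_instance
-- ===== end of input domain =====

-- ===== PORT A =====
-- B replaces A's list-building loop with the Gauss closed form (O(1) vs O(T)).
def distanceCalc (T : Int) : Int :=
  let listVal := ((PySem.List.pyRange 0 T 1).map (fun N => N + 1)).reverse
  (PySem.List.pyRange 0 T 1).foldl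
    (fun distCalc i =>
      if i == 0 then distCalc + 2 * PySem.List.pyGetD listVal i 0
      else distCalc + PySem.List.pyGetD listVal i 0) 0

-- ===== PORT B =====
def distanceCalc_alt (T : Int) : Int :=
  if T ≤ 0 then 0 else 2 * T + PySem.Int.floordiv (T * (T - 1)) 2

-- ===== PRECONDITION & SPEC =====
def Spec_distanceCalc (T : Int) (out : Int) : Prop := out = distanceCalc_alt T
instance (T : Int) (out : Int) : Decidable (Spec_distanceCalc T out) := by unfold Spec_distanceCalc; infer_instance

-- ===== CLAIM (what is proved, stated in full; the proofs are below) =====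
def Claim_equal_distanceCalc : Prop := ∀ (T : Int), Dom_distanceCalc T → Spec_distanceCalc T (distanceCalc T)

-- ===== LEMMAS AND PROOFS =====

-- listVal of A, for positive T, is the countdown [T, T-1, …, 1].
lemma pv_listVal (T : Int) :
    ((PySem.List.pyRange 0 T 1).map (fun N => N + 1)).reverse = PySem.List.pyRange T 0 (-1) := by
  rw [PySem.List.pyRange_neg_one_eq_reverse]
  congr 1
  rw [PySem.List.pyRange_one, PySem.List.pyRange_one, List.map_map]
  have h : (T - 0).toNat = (T + 1 - 1).toNat := by omega
  rw [h]
  apply List.map_congr_left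
  intro k _
  simp only [Function.comp_apply]
  ring

lemma pv_sum_countdown (n : Nat) :
    2 * (PySem.List.pyRange (n : Int) 0 (-1)).sum = (n : Int) * ((n : Int) + 1) := by
  induction n with
  | zero => simp [PySem.List.pyRange_neg_one_eq_nil le_rfl]
  | succ m ih =>
      rw [show ((m + 1 : Nat) : Int) = (m : Int) + 1 by push_cast; ring,
          PySem.List.pyRange_neg_one_cons (by positivity), List.sum_cons,
          show (m : Int) + 1 - 1 = (m : Int) by ring]
      nlinarith [ih]

-- ===== VERDICT (by name: the statement is the Claim_ definition above) =====
theorem distanceCalc_spec : Claim_equal_distanceCalc := by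
  intro T _
  unfold Spec_distanceCalc distanceCalc distanceCalc_alt
  by_cases hT : T ≤ 0
  · rw [PySem.List.pyRange_one_eq_nil hT]
    simp [hT]
  · rw [not_le] at hT
    rw [if_neg (by omega)]
    simp only [pv_listVal]
    rw [PySem.List.pyRange_neg_one_cons hT]
    rw [PySem.List.pyRange_one_cons hT]
    simp only [List.foldl_cons]
    -- first iteration: i = 0 adds 2 * listVal[0] = 2 * T
    simp only [beq_self_eq_true, if_true, PySem.List.pyGetD_zero_cons, zero_add,
               show (0 : Int) + 1 = 1 from rfl]
    -- remaining iterations: i ∈ pyRange 1 T 1 is never 0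
    have hcongr :
        (PySem.List.pyRange 1 T 1).foldl
          (fun distCalc i =>
            if i == 0 then distCalc + 2 * PySem.List.pyGetD (T :: PySem.List.pyRange (T - 1) 0 (-1)) i 0
            else distCalc + PySem.List.pyGetD (T :: PySem.List.pyRange (T - 1) 0 (-1)) i 0) (2 * T)
        = (PySem.List.pyRange 1 T 1).foldl
          (fun acc i => acc + PySem.List.pyGetD (T :: PySem.List.pyRange (T - 1) 0 (-1)) i 0) (2 * T) :=
      PySem.List.foldl_congr_mem _ _ _ _ (by
        intro acc x hx
        rw [PySem.List.mem_pyRange_one] at hx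
        rw [if_neg (by simpa using (by omega : x ≠ 0))])
    rw [hcongr]
    -- the fold over indices 1..T-1 sums the tail of listVal
    have hlen : T = ((T :: PySem.List.pyRange (T - 1) 0 (-1)).length : Int) := by
      rw [List.length_cons, PySem.List.length_pyRange_neg_one]
      omega
    have hdrop := PySem.List.foldl_pyRange_pyGetD'
      (T :: PySem.List.pyRange (T - 1) 0 (-1)) (0 : Int)
      (fun acc v => acc + v) (2 * T) (a := 1) (by norm_num)
    rw [← hlen, show ((1 : Int)).toNat = 1 from rfl, List.drop_one, List.tail_cons] at hdrop
    rw [hdrop]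
    rw [PySem.List.foldl_add (g := fun x => x)]
    simp only [List.map_id']
    -- closed form: 2*T + sum(T-1 down to 1) = 2*T + T*(T-1)//2
    have h1 : T - 1 = ((T - 1).toNat : Int) := by omega
    have h2 := pv_sum_countdown (T - 1).toNat
    rw [← h1] at h2
    have hfd : PySem.Int.floordiv (T * (T - 1)) 2 = (PySem.List.pyRange (T - 1) 0 (-1)).sum := by
      have : T * (T - 1) = 2 * (PySem.List.pyRange (T - 1) 0 (-1)).sum := by nlinarith [h2]
      rw [this, PySem.Int.floordiv]
      exact Int.mul_fdiv_cancel_left _ (by norm_num)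
    rw [hfd]
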